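-- pv_equiv track=rewrite | github.com/iankvdh/Teoria-de-Algoritmos | GUIAS/REDUCCIONES/ej16.py | verificador_hitting_set
-- ===== SOURCE A (Python) =====
-- def verificador_hitting_set(A, conjs_B, k, C):
--     """
--     Verifica si la solución del hitting set es correcta.
--     """
--     if len(C) > k:
--         return False
--
--     for bi in conjs_B:
--         aparece = False
--         for c in C:
--             if c in bi:
--                 aparece = True
--                 break
--         if not aparece:
--             return False
--     return True
-- ===== SOURCE B (Python) =====
-- def verificador_hitting_set(A, conjs_B, k, C):
--     if len(C) > k:
--         return False
--     pendientes = set(range(len(conjs_B)))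
--     for c in C:
--         if not pendientes:
--             break
--         pendientes = {i for i in pendientes if c not in conjs_B[i]}
--     return not pendientes
-- ===== Notes on version B (the rewrite author's own statement) =====
-- stated objective: alternative
-- what changed: Drives the iteration by the candidate elements of C, maintaining a shrinking frontier of indices of not-yet-hit sets (with early exit once empty), instead of re-scanning C for each set in conjs_B with a flag and early returns.
import Mathlib
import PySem

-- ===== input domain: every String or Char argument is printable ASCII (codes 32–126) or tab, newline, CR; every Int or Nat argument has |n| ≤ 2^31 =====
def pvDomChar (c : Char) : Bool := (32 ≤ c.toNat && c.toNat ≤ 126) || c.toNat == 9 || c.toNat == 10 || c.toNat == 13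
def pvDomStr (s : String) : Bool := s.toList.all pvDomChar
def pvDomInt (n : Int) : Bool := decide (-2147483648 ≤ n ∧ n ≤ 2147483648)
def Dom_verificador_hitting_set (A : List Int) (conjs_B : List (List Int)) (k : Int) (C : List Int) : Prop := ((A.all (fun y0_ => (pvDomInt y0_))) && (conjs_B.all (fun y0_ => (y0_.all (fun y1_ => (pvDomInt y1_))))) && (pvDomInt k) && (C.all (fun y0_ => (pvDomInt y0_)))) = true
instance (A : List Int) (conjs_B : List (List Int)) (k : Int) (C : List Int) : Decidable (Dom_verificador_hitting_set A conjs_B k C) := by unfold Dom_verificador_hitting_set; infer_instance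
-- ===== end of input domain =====

-- B replaces A's per-set rescans of C (flag + early returns) with a candidate-driven fold over C that shrinks a frontier of unsatisfied set indices (alternative decomposition, same cost).


-- ===== PORT A =====
-- inner 'for c in C: if c in bi: aparece = True; break' — returns the flag aparece
def pvA_scanC (bi : List Int) : List Int → Bool
  | [] => false
  | c :: cs => if bi.contains c then true else pvA_scanC bi cs

-- outer 'for bi in conjs_B: … if not aparece: return False' / final 'return True'
def pvA_loopB (C : List Int) : List (List Int) → Bool
  | [] => true
  | bi :: rest =>
      let aparece := pvA_scanC bi C
      if !aparece then false else pvA_loopB C rest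

def verificador_hitting_set (A : List Int) (conjs_B : List (List Int)) (k : Int) (C : List Int) : Bool :=
  if (C.length : Int) > k then false
  else pvA_loopB C conjs_B

-- ===== PORT B =====
-- frontier of indices of not-yet-hit sets, shrunk per candidate element, with early exit
def verificador_hitting_set_alt (A : List Int) (conjs_B : List (List Int)) (k : Int) (C : List Int) : Bool :=
  if (C.length : Int) > k then false
  else
    (C.foldl
      (fun pendientes c =>
        if pendientes.isEmpty then pendientes
        else pendientes.filter (fun i => !((conjs_B.getD i []).contains c)))
      (List.range conjs_B.length)).isEmpty

-- ===== PRECONDITION & SPEC =====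
def Spec_verificador_hitting_set (A : List Int) (conjs_B : List (List Int)) (k : Int) (C : List Int) (out : Bool) : Prop := out = verificador_hitting_set_alt A conjs_B k C
instance (A : List Int) (conjs_B : List (List Int)) (k : Int) (C : List Int) (out : Bool) : Decidable (Spec_verificador_hitting_set A conjs_B k C out) := by unfold Spec_verificador_hitting_set; infer_instance

-- ===== CLAIM (what is proved, stated in full; the proofs are below) =====
def Claim_equal_verificador_hitting_set : Prop := ∀ (A : List Int) (conjs_B : List (List Int)) (k : Int) (C : List Int), Dom_verificador_hitting_set A conjs_B k C → Spec_verificador_hitting_set A conjs_B k C (verificador_hitting_set A conjs_B k C)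

-- ===== LEMMAS AND PROOFS =====

-- A's inner scan is membership of some c of C in bi
theorem scanC_eq_any (bi C : List Int) : pvA_scanC bi C = C.any (fun c => bi.contains c) := by
  induction C with
  | nil => rfl
  | cons c cs ih =>
    simp only [pvA_scanC, List.any_cons, ih]
    split <;> simp_all

-- A's outer loop is a conjunction over conjs_B
theorem loopB_eq_all (C : List Int) (bs : List (List Int)) :
    pvA_loopB C bs = bs.all (fun bi => C.any (fun c => bi.contains c)) := by
  induction bs with
  | nil => rfl
  | cons bi rest ih =>
    simp only [pvA_loopB, List.all_cons, scanC_eq_any, ih]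
    split <;> simp_all

-- the early-exit guard is inert: filtering the empty list yields the empty list
theorem foldl_filter_guard (conjs_B : List (List Int)) (C : List Int) (L : List Nat) :
    C.foldl (fun pendientes c =>
        if pendientes.isEmpty then pendientes
        else pendientes.filter (fun i => !((conjs_B.getD i []).contains c))) L
      = C.foldl (fun pendientes c =>
        pendientes.filter (fun i => !((conjs_B.getD i []).contains c))) L := by
  induction C generalizing L with
  | nil => rfl
  | cons c cs ih =>
    simp only [List.foldl_cons]
    split
    · next h =>
      rw [List.isEmpty_iff] at h
      subst h
      exact ih []
    · exact ih _

-- iterated filtering = one filter by the conjunction over C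
theorem foldl_filter_eq_filter_all (conjs_B : List (List Int)) (C : List Int) (L : List Nat) :
    C.foldl (fun pendientes c =>
        pendientes.filter (fun i => !((conjs_B.getD i []).contains c))) L
      = L.filter (fun i => C.all (fun c => !((conjs_B.getD i []).contains c))) := by
  induction C generalizing L with
  | nil => simp
  | cons c cs ih =>
    simp only [List.foldl_cons, ih, List.filter_filter, List.all_cons]
    exact List.filter_congr (fun i _ => by rw [Bool.and_comm])

-- ===== VERDICT (by name: the statement is the Claim_ definition above) =====
theorem verificador_hitting_set_spec : Claim_equal_verificador_hitting_set := by
  intro A conjs_B k C _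
  unfold Spec_verificador_hitting_set verificador_hitting_set verificador_hitting_set_alt
  split
  · rfl
  · rw [loopB_eq_all, foldl_filter_guard, foldl_filter_eq_filter_all, Bool.eq_iff_iff]
    rw [List.isEmpty_iff, List.filter_eq_nil_iff]
    simp only [List.all_eq_true, List.any_eq_true, List.mem_range, Bool.not_eq_true',
      List.contains_eq_mem, decide_eq_true_eq, decide_eq_false_iff_not]
    constructor
    · intro h i hi hall
      obtain ⟨c, hc, hm⟩ := h (conjs_B.getD i []) (by
        rw [List.getD_eq_getElem?_getD, List.getElem?_eq_getElem hi]
        exact conjs_B.getElem_mem hi)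
      exact hall c hc hm
    · intro h bi hbi
      obtain ⟨i, hi, rfl⟩ := List.mem_iff_getElem.mp hbi
      have := h i hi
      rw [List.getD_eq_getElem?_getD, List.getElem?_eq_getElem hi] at this
      push_neg at this
      obtain ⟨c, hc, hm⟩ := this
      exact ⟨c, hc, hm⟩
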